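-- pv_equiv track=rewrite | github.com/laits1/CodingTest | 프로그래머스/LV1/부족한 금액 계산하기.py | solution
-- ===== SOURCE A (Python) =====
-- def solution(price, money, count):
--     answer = 0
--     sum = 0
--     for i in range(count) :
--         sum = sum + (i+1) * price
--
--     if (money < sum) :
--         answer = sum - money
--
--     return answer
-- ===== SOURCE B (Python) =====
-- def solution(price, money, count):
--     n = count if count > 0 else 0
--     total = price * n * (n + 1) // 2
--     diff = total - money
--     return diff if diff > 0 else 0
-- ===== Notes on version B (the rewrite author's own statement) =====
-- stated objective: faster
-- what changed: Replaces the O(count) summation loop with the closed-form Gauss formula price*count*(count+1)//2.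
import Mathlib
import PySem

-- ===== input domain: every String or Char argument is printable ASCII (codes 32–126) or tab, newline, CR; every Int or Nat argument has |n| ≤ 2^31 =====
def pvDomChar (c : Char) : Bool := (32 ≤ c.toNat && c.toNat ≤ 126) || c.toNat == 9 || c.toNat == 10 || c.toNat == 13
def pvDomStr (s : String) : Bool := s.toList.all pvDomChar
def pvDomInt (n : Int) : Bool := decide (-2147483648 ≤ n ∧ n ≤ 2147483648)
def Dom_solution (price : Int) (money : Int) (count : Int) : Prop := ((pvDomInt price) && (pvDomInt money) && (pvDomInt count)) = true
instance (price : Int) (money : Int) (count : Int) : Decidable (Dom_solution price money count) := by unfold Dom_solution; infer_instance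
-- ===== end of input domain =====

-- B replaces A's O(count) summation loop with the closed-form Gauss formula (faster, asymptotic).


-- ===== PORT A =====
def solution (price : Int) (money : Int) (count : Int) : Int :=
  let answer : Int := 0
  let sum := (PySem.List.pyRange 0 count 1).foldl (fun s i => s + (i + 1) * price) 0
  let answer := if money < sum then sum - money else answer
  answer

-- ===== PORT B =====
def solution_alt (price : Int) (money : Int) (count : Int) : Int :=
  let n := if count > 0 then count else 0
  let total := PySem.Int.floordiv (price * n * (n + 1)) 2
  let diff := total - money
  if diff > 0 then diff else 0

-- ===== PRECONDITION & SPEC =====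
def Spec_solution (price : Int) (money : Int) (count : Int) (out : Int) : Prop := out = solution_alt price money count
instance (price : Int) (money : Int) (count : Int) (out : Int) : Decidable (Spec_solution price money count out) := by unfold Spec_solution; infer_instance

-- ===== CLAIM (what is proved, stated in full; the proofs are below) =====
def Claim_equal_solution : Prop := ∀ (price : Int) (money : Int) (count : Int), Dom_solution price money count → Spec_solution price money count (solution price money count)

-- ===== LEMMAS AND PROOFS =====

-- the loop sum over range(n), doubled to avoid division
lemma pv_sum_lemma (price : Int) : ∀ (n : Nat) (init : Int),
    2 * ((PySem.List.pyRange 0 (n : Int) 1).foldl (fun s i => s + (i + 1) * price) init)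
      = 2 * init + price * n * (n + 1) := by
  intro n
  induction n with
  | zero => intro init; simp [PySem.List.pyRange_one_eq_nil]
  | succ m ih =>
    intro init
    have h : PySem.List.pyRange 0 ((m : Int) + 1) 1
        = PySem.List.pyRange 0 (m : Int) 1 ++ [(m : Int)] :=
      PySem.List.pyRange_one_succ_right (by positivity)
    push_cast
    rw [h, List.foldl_append]
    simp only [List.foldl]
    linear_combination ih init

theorem solution_spec : Claim_equal_solution := by
  intro price money count _
  unfold Spec_solution solution solution_alt
  by_cases hc : count > 0
  · have hn : ((count.toNat : Int)) = count := Int.toNat_of_nonneg (le_of_lt hc)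
    have hsum := pv_sum_lemma price count.toNat 0
    rw [hn] at hsum
    simp only [mul_zero, zero_add] at hsum
    set S := (PySem.List.pyRange 0 count 1).foldl (fun s i => s + (i + 1) * price) 0 with hS
    simp only [hc, if_pos]
    rw [PySem.Int.floordiv_eq_ediv_of_pos (by norm_num)]
    have : price * count * (count + 1) = 2 * S := hsum.symm
    rw [this, Int.mul_ediv_cancel_left S (by norm_num)]
    split_ifs <;> omega
  · have hnil : PySem.List.pyRange 0 count 1 = [] :=
      PySem.List.pyRange_one_eq_nil (by omega)
    rw [hnil]
    simp only [List.foldl_nil, if_neg hc]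
    norm_num [PySem.Int.floordiv]
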